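-- pv_equiv track=rewrite | github.com/conner0910/Computer-Vision | prprc.py | sobelxfun
-- ===== SOURCE A (Python) =====
-- def sobelxfun(img, rows, col):
--     sobelx = [[0 for x in range(col)] for y in range(rows)]
--     for i in range(rows):
--         for j in range(col):
--             if i - 1 >= 0 and j - 1 >= 0 and i + 1 < rows and j + 1 < col: #reg case
--                 left = img[i][j - 1] * 2
--                 topLeft = img[i - 1][j - 1]* 1
--                 top = img[i - 1][j] * 0
--                 topRight = img[i - 1][j + 1] * -1
--                 right = img[i][j + 1] * -2
--                 botRight = img[i + 1][j + 1] * -1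
--                 bot = img[i + 1][j] * 0
--                 botLeft = img[i + 1][j - 1] * 1
--                 sum = left + topLeft + top + topRight + right + botRight + bot + botLeft
--                 sobelx[i][j] = abs(sum)
--     return sobelx
-- ===== SOURCE B (Python) =====
-- def sobelxfun(img, rows, col):
--     # Separable Sobel-X: kernel [[1,0,-1],[2,0,-2],[1,0,-1]] = [1,2,1]^T x [1,0,-1].
--     # Stage 1 takes horizontal differences, stage 2 smooths them vertically.
--     if rows < 3 or col < 3:
--         return [[0] * col for _ in range(rows)]
--     h = [[img[i][j] - img[i][j + 2] for j in range(col - 2)] for i in range(rows)]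
--     def row(i):
--         if i == 0 or i == rows - 1:
--             return [0] * col
--         return [0] + [abs(h[i - 1][j] + 2 * h[i][j] + h[i + 1][j])
--                       for j in range(col - 2)] + [0]
--     return [row(i) for i in range(rows)]
-- ===== Notes on version B (the rewrite author's own statement) =====
-- stated objective: alternative
-- what changed: B exploits the separability of the Sobel-X kernel ([1,2,1]^T x [1,0,-1]): a first pass stores horizontal differences img[i][j]-img[i][j+2], a second pass smooths them vertically (h[i-1]+2h[i]+h[i+1]) and pads borders by list concatenation, replacing A's single pass that mutates a zero matrix with the eight-term stencil per pixel; Pre_ excludes the shapes (rows>=3 and col>=3 with fewer than rows image rows or some of the first rows rows shorter than col) on which A raises IndexError.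
import Mathlib
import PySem

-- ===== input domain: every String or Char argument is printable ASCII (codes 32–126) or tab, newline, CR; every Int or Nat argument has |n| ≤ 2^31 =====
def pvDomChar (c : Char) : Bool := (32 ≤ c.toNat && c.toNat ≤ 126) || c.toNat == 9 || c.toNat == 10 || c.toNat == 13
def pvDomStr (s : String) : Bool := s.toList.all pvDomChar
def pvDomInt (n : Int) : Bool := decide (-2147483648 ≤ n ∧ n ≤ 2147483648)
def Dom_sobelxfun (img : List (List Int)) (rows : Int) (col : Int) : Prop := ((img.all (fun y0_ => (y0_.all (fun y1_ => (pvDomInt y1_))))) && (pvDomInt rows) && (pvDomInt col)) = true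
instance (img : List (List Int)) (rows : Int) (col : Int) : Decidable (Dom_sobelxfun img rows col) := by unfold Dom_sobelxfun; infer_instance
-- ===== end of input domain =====

-- B exploits separability of the Sobel-X kernel ([1,2,1]^T × [1,0,-1]): a horizontal-difference
-- pass followed by a vertical smoothing pass with concatenated zero borders, instead of A's
-- single pass mutating a zero matrix with the eight-term stencil (alternative decomposition).

-- ===== PORT A =====
-- img[i][j] under Pre_ (in-range); default never used inside Pre_
def pvGet2 (img : List (List Int)) (i j : Int) : Int :=
  PySem.List.pyGetD (PySem.List.pyGetD img i []) j 0

def sobelxfun (img : List (List Int)) (rows : Int) (col : Int) : List (List Int) :=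
  let sobelx := (PySem.List.pyRange 0 rows 1).map
    (fun _ => (PySem.List.pyRange 0 col 1).map (fun _ => (0 : Int)))
  (PySem.List.pyRange 0 rows 1).foldl (fun m i =>
    (PySem.List.pyRange 0 col 1).foldl (fun m j =>
      if i - 1 ≥ 0 ∧ j - 1 ≥ 0 ∧ i + 1 < rows ∧ j + 1 < col then
        let left := pvGet2 img i (j - 1) * 2
        let topLeft := pvGet2 img (i - 1) (j - 1) * 1
        let top := pvGet2 img (i - 1) j * 0
        let topRight := pvGet2 img (i - 1) (j + 1) * (-1)
        let right := pvGet2 img i (j + 1) * (-2)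
        let botRight := pvGet2 img (i + 1) (j + 1) * (-1)
        let bot := pvGet2 img (i + 1) j * 0
        let botLeft := pvGet2 img (i + 1) (j - 1) * 1
        let sum := left + topLeft + top + topRight + right + botRight + bot + botLeft
        PySem.List.pySetD m i (PySem.List.pySetD (PySem.List.pyGetD m i []) j |sum|)
      else m) m) sobelx

-- ===== PORT B =====
-- stage 1 of Source B: horizontal differences h[i][j] = img[i][j] - img[i][j+2]
def pvH (img : List (List Int)) (rows col : Int) : List (List Int) :=
  (PySem.List.pyRange 0 rows 1).map (fun i =>
    (PySem.List.pyRange 0 (col - 2) 1).map (fun j => pvGet2 img i j - pvGet2 img i (j + 2)))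

def sobelxfun_alt (img : List (List Int)) (rows : Int) (col : Int) : List (List Int) :=
  if rows < 3 ∨ col < 3 then
    (PySem.List.pyRange 0 rows 1).map (fun _ => List.replicate col.toNat (0 : Int))
  else
    (PySem.List.pyRange 0 rows 1).map (fun i =>
      if i = 0 ∨ i = rows - 1 then List.replicate col.toNat (0 : Int)
      else [0] ++ (PySem.List.pyRange 0 (col - 2) 1).map (fun j =>
        |pvGet2 (pvH img rows col) (i - 1) j + 2 * pvGet2 (pvH img rows col) i j +
          pvGet2 (pvH img rows col) (i + 1) j|) ++ [0])

-- ===== PRECONDITION & SPEC =====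
-- Pre_ excludes exactly the inputs on which the Python A raises IndexError: when interior pixels
-- exist (rows ≥ 3 and col ≥ 3) the image must supply at least rows rows, each of the first rows
-- rows at least col wide.
def Pre_sobelxfun (img : List (List Int)) (rows : Int) (col : Int) : Prop :=
  (3 ≤ rows ∧ 3 ≤ col) →
    (rows ≤ (img.length : Int) ∧ ∀ r ∈ img.take rows.toNat, col ≤ (r.length : Int))
instance (img : List (List Int)) (rows : Int) (col : Int) : Decidable (Pre_sobelxfun img rows col) := by
  unfold Pre_sobelxfun; infer_instance

def pvWitness_sobelxfun : List (List Int) × Int × Int :=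
  ([[1, 2, 3], [4, 5, 6], [7, 8, 9]], 3, 3)

def Spec_sobelxfun (img : List (List Int)) (rows : Int) (col : Int) (out : List (List Int)) : Prop := out = sobelxfun_alt img rows col
instance (img : List (List Int)) (rows : Int) (col : Int) (out : List (List Int)) : Decidable (Spec_sobelxfun img rows col out) := by unfold Spec_sobelxfun; infer_instance

-- ===== CLAIM (what is proved, stated in full; the proofs are below) =====
def Claim_equal_sobelxfun : Prop := ∀ (img : List (List Int)) (rows : Int) (col : Int), Dom_sobelxfun img rows col → Pre_sobelxfun img rows col → Spec_sobelxfun img rows col (sobelxfun img rows col)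

-- ===== LEMMAS AND PROOFS =====

-- A's value at an interior pixel (proof-side abbreviation)
def pvA (img : List (List Int)) (i j : Int) : Int :=
  |pvGet2 img i (j - 1) * 2 + pvGet2 img (i - 1) (j - 1) * 1 + pvGet2 img (i - 1) j * 0 +
    pvGet2 img (i - 1) (j + 1) * (-1) + pvGet2 img i (j + 1) * (-2) +
    pvGet2 img (i + 1) (j + 1) * (-1) + pvGet2 img (i + 1) j * 0 +
    pvGet2 img (i + 1) (j - 1) * 1|

-- writing back the row read at k is a no-op
theorem pvSet_getD_self {α : Type} (m : List α) (k : Nat) (d : α) :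
    m.set k (m.getD k d) = m := by
  by_cases h : k < m.length
  · rw [List.getD_eq_getElem m d h]; exact List.set_getElem_self h
  · rw [List.set_eq_of_length_le (by omega)]

-- an index loop that only rewrites slot k collapses to one set of the folded row
theorem pvInnerCollapse {α : Type} (g : α → Nat → α) (d : α) :
    ∀ (ls : List Nat) (m : List α) (k : Nat),
      ls.foldl (fun m l => m.set k (g (m.getD k d) l)) m
        = m.set k (ls.foldl g (m.getD k d)) := by
  intro ls
  induction ls with
  | nil => intro m k; exact (pvSet_getD_self m k d).symm
  | cons l ls ih =>
    intro m k
    simp only [List.foldl_cons]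
    rw [ih]
    by_cases h : k < m.length
    · have hx : ∀ x : α, (m.set k x).getD k d = x := fun x => by
        rw [List.getD_eq_getElem?_getD, List.getElem?_set_self (by simpa using h)]; rfl
      rw [hx, List.set_set]
    · have hm : ∀ x : α, m.set k x = m := fun x => List.set_eq_of_length_le (by omega)
      simp only [hm]

theorem pvFoldSet_length {α : Type} (h : Nat → α → α) (d : α) :
    ∀ (n : Nat) (z : List α),
      ((List.range n).foldl (fun m i => m.set i (h i (m.getD i d))) z).length = z.length := by
  intro n
  induction n with
  | zero => intro z; simp
  | succ n ih => intro z; rw [List.range_succ, List.foldl_append]; simpa using ih z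

-- getElem? characterization of the fold that rewrites each slot i once, in order
theorem pvFoldSet_getElem? {α : Type} (h : Nat → α → α) (d : α) :
    ∀ (n : Nat) (z : List α) (k : Nat),
      ((List.range n).foldl (fun m i => m.set i (h i (m.getD i d))) z)[k]? =
        if k < n then (z[k]?).map (h k) else z[k]? := by
  intro n
  induction n with
  | zero => intro z k; simp
  | succ n ih =>
    intro z k
    rw [List.range_succ, List.foldl_append]
    simp only [List.foldl_cons, List.foldl_nil]
    rw [List.getElem?_set]
    by_cases hk : n = k
    · subst hk
      have hF := ih z n
      have hFn : ((List.range n).foldl (fun m i => m.set i (h i (m.getD i d))) z)[n]? = z[n]? := by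
        rw [hF]; simp
      have hlen : ((List.range n).foldl (fun m i => m.set i (h i (m.getD i d))) z).length
          = z.length := pvFoldSet_length h d n z
      by_cases hz : n < z.length
      · rw [if_pos rfl, if_pos (by omega)]
        rw [List.getD_eq_getElem?_getD, hFn, List.getElem?_eq_getElem hz]
        simp
      · rw [if_pos rfl, if_neg (by omega), if_pos (by omega), List.getElem?_eq_none (by omega)]
        rfl
    · rw [if_neg hk, ih z k]
      by_cases hkn : k < n
      · rw [if_pos hkn, if_pos (by omega)]
      · rw [if_neg hkn, if_neg (by omega)]

theorem pvFoldSet_eq_map {α : Type} (h : Nat → α → α) (d : α) (n : Nat) (z : List α)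
    (hz : z.length = n) :
    (List.range n).foldl (fun m i => m.set i (h i (m.getD i d))) z
      = (List.range n).map (fun k => h k (z.getD k d)) := by
  apply List.ext_getElem?
  intro k
  rw [pvFoldSet_getElem? h d n z k, List.getElem?_map]
  by_cases hk : k < n
  · rw [if_pos hk, List.getElem?_range hk, Option.map_some,
      List.getD_eq_getElem?_getD, List.getElem?_eq_getElem (show k < z.length by omega)]
    rfl
  · rw [if_neg hk, List.getElem?_eq_none (show (List.range n).length ≤ k by simpa using hk),
      List.getElem?_eq_none (show z.length ≤ k by omega)]
    rfl

-- A's port as a pure map of maps: guard per pixel, pvA inside, 0 outside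
theorem sobelxfun_eq_map (img : List (List Int)) (rows col : Int) :
    sobelxfun img rows col
      = (List.range rows.toNat).map (fun (k : Nat) => (List.range col.toNat).map (fun (l : Nat) =>
          if (k : Int) - 1 ≥ 0 ∧ (l : Int) - 1 ≥ 0 ∧ (k : Int) + 1 < rows ∧ (l : Int) + 1 < col
          then pvA img (k : Int) (l : Int) else 0)) := by
  unfold sobelxfun
  rw [PySem.List.pyRange_one 0 rows, PySem.List.pyRange_one 0 col]
  simp only [sub_zero, zero_add, List.foldl_map, List.map_map,
    PySem.List.pySetD_natCast, PySem.List.pyGetD_natCast]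
  set n := rows.toNat with hn
  set c := col.toNat with hc
  let V : Int → Int → Int := fun i j =>
    |pvGet2 img i (j - 1) * 2 + pvGet2 img (i - 1) (j - 1) * 1 + pvGet2 img (i - 1) j * 0 +
      pvGet2 img (i - 1) (j + 1) * (-1) + pvGet2 img i (j + 1) * (-2) +
      pvGet2 img (i + 1) (j + 1) * (-1) + pvGet2 img (i + 1) j * 0 +
      pvGet2 img (i + 1) (j - 1) * 1|
  let zrow : List Int := List.map ((fun _ => (0 : Int)) ∘ fun (k : Nat) => (k : Int)) (List.range c)
  have hzrowD : ∀ l : Nat, zrow.getD l 0 = 0 := by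
    intro l
    rw [List.getD_eq_getElem?_getD, List.getElem?_map]
    cases (List.range c)[l]? <;> rfl
  have hzrowLen : zrow.length = c := by
    show (List.map ((fun _ => (0 : Int)) ∘ fun (k : Nat) => (k : Int)) (List.range c)).length = c
    rw [List.length_map, List.length_range]
  have step1 : (fun (m : List (List Int)) (k : Nat) =>
      (List.range c).foldl (fun (m : List (List Int)) (l : Nat) =>
        if (k : Int) - 1 ≥ 0 ∧ (l : Int) - 1 ≥ 0 ∧ (k : Int) + 1 < rows ∧ (l : Int) + 1 < col then
          m.set k ((m.getD k []).set l (V k l)) else m) m)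
      = (fun (m : List (List Int)) (k : Nat) => m.set k
          ((fun (k : Nat) (r : List Int) => (List.range c).foldl
            (fun (r : List Int) (l : Nat) => r.set l
              (if (k : Int) - 1 ≥ 0 ∧ (l : Int) - 1 ≥ 0 ∧ (k : Int) + 1 < rows ∧ (l : Int) + 1 < col
               then V k l else r.getD l 0)) r) k (m.getD k []))) := by
    funext m k
    have hbody : (fun (m : List (List Int)) (l : Nat) =>
        if (k : Int) - 1 ≥ 0 ∧ (l : Int) - 1 ≥ 0 ∧ (k : Int) + 1 < rows ∧ (l : Int) + 1 < col then
          m.set k ((m.getD k []).set l (V k l)) else m)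
        = (fun (m : List (List Int)) (l : Nat) => m.set k
            ((fun (r : List Int) (l : Nat) => r.set l
              (if (k : Int) - 1 ≥ 0 ∧ (l : Int) - 1 ≥ 0 ∧ (k : Int) + 1 < rows ∧ (l : Int) + 1 < col
               then V k l else r.getD l 0)) (m.getD k []) l)) := by
      funext m l
      by_cases h : (k : Int) - 1 ≥ 0 ∧ (l : Int) - 1 ≥ 0 ∧ (k : Int) + 1 < rows ∧ (l : Int) + 1 < col
      · simp only [if_pos h]
      · simp only [if_neg h]
        rw [pvSet_getD_self, pvSet_getD_self]
    rw [hbody]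
    exact pvInnerCollapse
      (fun (r : List Int) (l : Nat) => r.set l
        (if (k : Int) - 1 ≥ 0 ∧ (l : Int) - 1 ≥ 0 ∧ (k : Int) + 1 < rows ∧ (l : Int) + 1 < col
         then V k l else r.getD l 0))
      [] (List.range c) m k
  rw [step1]
  have step2 : (List.range n).foldl (fun (m : List (List Int)) (k : Nat) => m.set k
          ((fun (k : Nat) (r : List Int) => (List.range c).foldl
            (fun (r : List Int) (l : Nat) => r.set l
              (if (k : Int) - 1 ≥ 0 ∧ (l : Int) - 1 ≥ 0 ∧ (k : Int) + 1 < rows ∧ (l : Int) + 1 < col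
               then V k l else r.getD l 0)) r) k (m.getD k [])))
        (List.map ((fun _ => zrow) ∘ fun (k : Nat) => (k : Int)) (List.range n))
      = (List.range n).map (fun k =>
          (fun (k : Nat) (r : List Int) => (List.range c).foldl
            (fun (r : List Int) (l : Nat) => r.set l
              (if (k : Int) - 1 ≥ 0 ∧ (l : Int) - 1 ≥ 0 ∧ (k : Int) + 1 < rows ∧ (l : Int) + 1 < col
               then V k l else r.getD l 0)) r) k
          ((List.map ((fun _ => zrow) ∘ fun (k : Nat) => (k : Int)) (List.range n)).getD k [])) :=
    pvFoldSet_eq_map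
      (fun (k : Nat) (r : List Int) => (List.range c).foldl
        (fun (r : List Int) (l : Nat) => r.set l
          (if (k : Int) - 1 ≥ 0 ∧ (l : Int) - 1 ≥ 0 ∧ (k : Int) + 1 < rows ∧ (l : Int) + 1 < col
           then V k l else r.getD l 0)) r)
      [] n (List.map ((fun _ => zrow) ∘ fun (k : Nat) => (k : Int)) (List.range n))
      (by rw [List.length_map, List.length_range])
  rw [step2]
  apply List.map_congr_left
  intro k hk
  rw [List.mem_range] at hk
  have hzk : (List.map ((fun _ => zrow) ∘ fun (k : Nat) => (k : Int)) (List.range n)).getD k []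
      = zrow := by
    rw [List.getD_eq_getElem?_getD, List.getElem?_map, List.getElem?_range hk]
    rfl
  rw [hzk]
  beta_reduce
  have step3 : (List.range c).foldl
        (fun (r : List Int) (l : Nat) => r.set l
          (if (k : Int) - 1 ≥ 0 ∧ (l : Int) - 1 ≥ 0 ∧ (k : Int) + 1 < rows ∧ (l : Int) + 1 < col
           then V k l else r.getD l 0)) zrow
      = (List.range c).map (fun l =>
          (fun (l : Nat) (x : Int) =>
            if (k : Int) - 1 ≥ 0 ∧ (l : Int) - 1 ≥ 0 ∧ (k : Int) + 1 < rows ∧ (l : Int) + 1 < col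
            then V k l else x) l (zrow.getD l 0)) :=
    pvFoldSet_eq_map
      (fun (l : Nat) (x : Int) =>
        if (k : Int) - 1 ≥ 0 ∧ (l : Int) - 1 ≥ 0 ∧ (k : Int) + 1 < rows ∧ (l : Int) + 1 < col
        then V k l else x) 0 c zrow hzrowLen
  rw [step3]
  apply List.map_congr_left
  intro l hl
  simp only [hzrowD l]
  rfl

-- entries of the horizontal-difference pass
theorem pvH_get (img : List (List Int)) (rows col i j : Int)
    (hi0 : 0 ≤ i) (hi : i < rows) (hj0 : 0 ≤ j) (hj : j < col - 2) :
    pvGet2 (pvH img rows col) i j = pvGet2 img i j - pvGet2 img i (j + 2) := by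
  unfold pvH pvGet2
  rw [PySem.List.pyGetD_map_pyRange_of_nonneg _ rows i [] hi0 hi,
      PySem.List.pyGetD_map_pyRange_of_nonneg _ (col - 2) j 0 hj0 hj]

-- a row on which the guard never fires is the zero row
theorem pvZeroRow (img : List (List Int)) (rows col : Int) (k : Nat)
    (h : ∀ l : Nat, ¬((k : Int) - 1 ≥ 0 ∧ (l : Int) - 1 ≥ 0 ∧ (k : Int) + 1 < rows ∧ (l : Int) + 1 < col)) :
    (List.range col.toNat).map (fun (l : Nat) =>
        if (k : Int) - 1 ≥ 0 ∧ (l : Int) - 1 ≥ 0 ∧ (k : Int) + 1 < rows ∧ (l : Int) + 1 < col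
        then pvA img (k : Int) (l : Int) else 0)
      = List.replicate col.toNat (0 : Int) := by
  have : (List.range col.toNat).map (fun (l : Nat) =>
      if (k : Int) - 1 ≥ 0 ∧ (l : Int) - 1 ≥ 0 ∧ (k : Int) + 1 < rows ∧ (l : Int) + 1 < col
      then pvA img (k : Int) (l : Int) else 0) = (List.range col.toNat).map (fun _ => (0 : Int)) :=
    List.map_congr_left (fun l _ => if_neg (h l))
  rw [this, List.map_const', List.length_range]

-- ===== VERDICT (by name: the statement is the Claim_ definition above) =====
theorem sobelxfun_spec : Claim_equal_sobelxfun := by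
  intro img rows col _ _
  unfold Spec_sobelxfun
  rw [sobelxfun_eq_map]
  unfold sobelxfun_alt
  by_cases hdeg : rows < 3 ∨ col < 3
  · rw [if_pos hdeg, PySem.List.pyRange_one 0 rows]
    simp only [sub_zero, zero_add, List.map_map]
    apply List.map_congr_left
    intro k _
    exact pvZeroRow img rows col k (fun l => by omega)
  · rw [if_neg hdeg]
    rw [not_or, not_lt, not_lt] at hdeg
    obtain ⟨hr3, hc3⟩ := hdeg
    rw [PySem.List.pyRange_one 0 rows]
    simp only [sub_zero, zero_add, List.map_map]
    apply List.map_congr_left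
    intro k hk
    rw [List.mem_range] at hk
    simp only [Function.comp_apply]
    by_cases hb : (k : Int) = 0 ∨ (k : Int) = rows - 1
    · rw [if_pos hb]
      exact pvZeroRow img rows col k (fun l => by omega)
    · rw [if_neg hb]
      rw [not_or] at hb
      obtain ⟨hb0, hb1⟩ := hb
      rw [PySem.List.pyRange_one 0 (col - 2)]
      simp only [sub_zero, zero_add, List.map_map]
      set c' := (col - 2).toNat with hc'
      have hcol : col.toNat = c' + 2 := by omega
      rw [hcol, List.range_succ_eq_map, List.range_succ, List.map_cons]
      simp only [List.map_append, List.map_map, List.map_singleton,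
        List.cons_append]
      have hF0 : (if ((0 : Nat) : Int) - 1 ≥ 0 ∧ ((0 : Nat) : Int) - 1 ≥ 0 ∧
          ((0 : Nat) : Int) + 1 < rows ∧ ((0 : Nat) : Int) + 1 < col
          then pvA img k 0 else 0) = 0 := by
        exact if_neg (by omega)
      have hkn : (k : Int) < rows := by omega
      have hk1 : 1 ≤ (k : Int) := by
        rcases Nat.eq_zero_or_pos k with h0 | h1
        · exact absurd (by exact_mod_cast congrArg Nat.cast h0) hb0
        · exact_mod_cast h1
      have hkr : (k : Int) + 1 < rows := by omega
      congr 1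
      · exact if_neg (by intro h; have h2 := h.2.1; simp at h2)
      congr 1
      · apply List.map_congr_left
        intro j hj
        rw [List.mem_range] at hj
        simp only [Function.comp_apply]
        have hjc : (j : Int) < col - 2 := by omega
        rw [if_pos (by push_cast; omega)]
        have e1 : ((Nat.succ j : Nat) : Int) = (j : Int) + 1 := by push_cast; ring
        rw [e1]
        unfold pvA
        rw [pvH_get img rows col ((k : Int) - 1) j (by omega) (by omega) (by omega) hjc,
            pvH_get img rows col (k : Int) j (by omega) hkn (by omega) hjc,
            pvH_get img rows col ((k : Int) + 1) j (by omega) hkr (by omega) hjc]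
        have f1 : (j : Int) + 1 - 1 = (j : Int) := by ring
        have f2 : (j : Int) + 1 + 1 = (j : Int) + 2 := by ring
        rw [f1, f2]
        congr 1
        ring
      · rw [if_neg (by push_cast; omega)]
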